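-- pv_equiv track=rewrite | github.com/ludersGabriel/ring-network | game.py | verifySeqBaixa
-- ===== SOURCE A (Python) =====
-- def verifySeqBaixa(dice):
--   seq = sorted(dice)
--
--   j = 1
--   i = 0
--   while i < len(seq):
--     if seq[i] != j:
--       return False
--     i += 1
--     j += 1
--
--   return True
-- ===== SOURCE B (Python) =====
-- def verifySeqBaixa(dice):
--   n = len(dice)
--   seen = [False] * n
--   for v in dice:
--     if v < 1 or v > n or seen[v - 1]:
--       return False
--     seen[v - 1] = True
--   return True
-- ===== Notes on version B (the rewrite author's own statement) =====
-- stated objective: alternative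
-- what changed: Replaced sort-then-scan with a single pass over the unsorted list marking a boolean seen-array, rejecting out-of-range or duplicate values; O(n) comparisons instead of sorting (speed-up not consistently measurable against CPython's C sort).
import Mathlib
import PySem

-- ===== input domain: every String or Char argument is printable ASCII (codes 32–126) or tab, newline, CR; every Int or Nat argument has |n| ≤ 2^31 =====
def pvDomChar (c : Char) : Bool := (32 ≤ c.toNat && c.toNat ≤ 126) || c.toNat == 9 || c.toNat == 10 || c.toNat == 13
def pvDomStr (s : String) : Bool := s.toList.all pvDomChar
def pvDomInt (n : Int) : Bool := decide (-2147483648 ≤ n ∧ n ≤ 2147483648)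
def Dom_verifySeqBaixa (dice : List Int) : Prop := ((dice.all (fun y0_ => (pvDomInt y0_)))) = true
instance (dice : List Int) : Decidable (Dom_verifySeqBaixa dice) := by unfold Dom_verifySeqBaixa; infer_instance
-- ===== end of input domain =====

-- B replaces A's sort-then-scan with one pass over the unsorted list marking a
-- boolean seen-array (objective: alternative; one pass instead of sorting).

-- ===== PORT A =====
-- A's while loop: i walks the sorted list, j counts 1,2,3,…
def verifySeqBaixaLoop : List Int → Int → Bool
  | [], _ => true
  | x :: xs, j => if x ≠ j then false else verifySeqBaixaLoop xs (j + 1)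

def verifySeqBaixa (dice : List Int) : Bool :=
  verifySeqBaixaLoop (PySem.List.sorted dice (fun x => x) false) 1

-- ===== PORT B =====
-- the for loop of Source B: v runs over dice, seen updated in place
def verifySeqBaixaAltLoop (n : Int) : List Int → List Bool → Bool
  | [], _ => true
  | v :: vs, seen =>
    if v < 1 || n < v || seen.getD (v - 1).toNat false then false
    else verifySeqBaixaAltLoop n vs (seen.set (v - 1).toNat true)

def verifySeqBaixa_alt (dice : List Int) : Bool :=
  verifySeqBaixaAltLoop (dice.length : Int) dice (List.replicate dice.length false)

-- ===== PRECONDITION & SPEC =====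
def Spec_verifySeqBaixa (dice : List Int) (out : Bool) : Prop := out = verifySeqBaixa_alt dice
instance (dice : List Int) (out : Bool) : Decidable (Spec_verifySeqBaixa dice out) := by unfold Spec_verifySeqBaixa; infer_instance

-- ===== CLAIM (what is proved, stated in full; the proofs are below) =====
def Claim_equal_verifySeqBaixa : Prop := ∀ (dice : List Int), Dom_verifySeqBaixa dice → Spec_verifySeqBaixa dice (verifySeqBaixa dice)

-- ===== LEMMAS AND PROOFS =====

-- the common characterisation: distinct values, all in 1..n
def SeqProp (dice : List Int) : Prop :=
  dice.Nodup ∧ ∀ v ∈ dice, 1 ≤ v ∧ v ≤ (dice.length : Int)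

-- the target list [j, j+1, …, j+n-1]
def seqTarget (j : Int) : Nat → List Int
  | 0 => []
  | n + 1 => j :: seqTarget (j + 1) n

theorem seqTarget_length (j : Int) (n : Nat) : (seqTarget j n).length = n := by
  induction n generalizing j with
  | zero => rfl
  | succ n ih => simp [seqTarget, ih]

theorem mem_seqTarget (v j : Int) (n : Nat) :
    v ∈ seqTarget j n ↔ j ≤ v ∧ v < j + (n : Int) := by
  induction n generalizing j with
  | zero => simp [seqTarget]
  | succ n ih =>
    simp only [seqTarget, List.mem_cons, ih]
    push_cast
    omega

theorem seqTarget_pairwise (j : Int) (n : Nat) : (seqTarget j n).Pairwise (· < ·) := by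
  induction n generalizing j with
  | zero => exact List.Pairwise.nil
  | succ n ih =>
    refine List.pairwise_cons.mpr ⟨?_, ih (j + 1)⟩
    intro v hv
    have := (mem_seqTarget v (j + 1) n).mp hv
    omega

theorem seqTarget_nodup (j : Int) (n : Nat) : (seqTarget j n).Nodup :=
  (seqTarget_pairwise j n).imp (fun h => ne_of_lt h)

theorem verifySeqBaixaLoop_iff (xs : List Int) (j : Int) :
    verifySeqBaixaLoop xs j = true ↔ xs = seqTarget j xs.length := by
  induction xs generalizing j with
  | nil => simp [verifySeqBaixaLoop, seqTarget]
  | cons x xs ih =>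
    simp only [verifySeqBaixaLoop, List.length_cons, seqTarget]
    by_cases hx : x = j
    · subst hx
      rw [if_neg (by simp)]
      rw [ih (x + 1)]
      constructor
      · intro h; exact congrArg (x :: ·) h
      · intro h; exact (List.cons_eq_cons.mp h).2
    · rw [if_pos (by simpa using hx)]
      constructor
      · intro h; exact absurd h (by simp)
      · intro h; exact absurd (List.cons_eq_cons.mp h).1 hx

-- A = true ↔ SeqProp
theorem portA_iff (dice : List Int) : verifySeqBaixa dice = true ↔ SeqProp dice := by
  unfold verifySeqBaixa
  rw [verifySeqBaixaLoop_iff]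
  have hperm : (PySem.List.sorted dice (fun x => x) false).Perm dice :=
    PySem.List.sorted_perm dice (fun x => x) false
  rw [hperm.length_eq]
  constructor
  · intro h
    have hperm' : dice.Perm (seqTarget 1 dice.length) := hperm.symm.trans (h ▸ List.Perm.refl _)
    refine ⟨hperm'.nodup_iff.mpr (seqTarget_nodup 1 dice.length), ?_⟩
    intro v hv
    have := (mem_seqTarget v 1 dice.length).mp (hperm'.mem_iff.mp hv)
    omega
  · rintro ⟨hnd, hmem⟩
    apply PySem.List.sorted_eq_of_perm_of_pairwise_lt
    · have hsub : dice ⊆ seqTarget 1 dice.length := by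
        intro v hv
        have := hmem v hv
        exact (mem_seqTarget v 1 dice.length).mpr (by omega)
      have hsp : dice.Subperm (seqTarget 1 dice.length) := List.subperm_of_subset hnd hsub
      exact (hsp.perm_of_length_le (by rw [seqTarget_length])).symm
    · exact seqTarget_pairwise 1 dice.length

theorem getD_set_bool (seen : List Bool) (i j : Nat) (hi : i < seen.length) :
    (seen.set i true).getD j false = (if j = i then true else seen.getD j false) := by
  by_cases h : j = i
  · subst h
    simp [List.getD, List.getElem?_set_self hi]
  · simp [List.getD, List.getElem?_set_ne (fun he => h he.symm), h]

-- B-side loop invariant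
theorem altLoop_iff (n : Int) (vs : List Int) (seen : List Bool)
    (hn : (seen.length : Int) = n) :
    verifySeqBaixaAltLoop n vs seen = true ↔
      vs.Nodup ∧ ∀ v ∈ vs, (1 ≤ v ∧ v ≤ n) ∧ seen.getD (v - 1).toNat false = false := by
  induction vs generalizing seen with
  | nil => simp [verifySeqBaixaAltLoop]
  | cons v vs ih =>
    simp only [verifySeqBaixaAltLoop]
    cases hc : (v < 1 || n < v || seen.getD (v - 1).toNat false) with
    | true =>
      rw [if_pos rfl]
      simp only [Bool.or_eq_true, decide_eq_true_eq] at hc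
      constructor
      · intro h; exact absurd h (by simp)
      · rintro ⟨-, hmem⟩
        obtain ⟨⟨h1, h2⟩, h3⟩ := hmem v (by simp)
        rcases hc with (hc | hc) | hc
        · omega
        · omega
        · rw [h3] at hc; exact absurd hc (by simp)
    | false =>
      rw [if_neg (by simp)]
      simp only [Bool.or_eq_false_iff, decide_eq_false_iff_not, not_lt] at hc
      obtain ⟨⟨h1, h2⟩, hs0⟩ := hc
      have hs' : seen.getD (v - 1).toNat false = false := by simpa using hs0
      have hidx : (v - 1).toNat < seen.length := by omega
      rw [ih (seen.set (v - 1).toNat true) (by simpa using hn)]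
      have hgetset : ∀ w : Int, 1 ≤ w →
          ((seen.set (v - 1).toNat true).getD (w - 1).toNat false = false ↔
            (w ≠ v ∧ seen.getD (w - 1).toNat false = false)) := by
        intro w hw1
        rw [getD_set_bool seen _ _ hidx]
        by_cases hwv : w = v
        · subst hwv; simp
        · have hne : (w - 1).toNat ≠ (v - 1).toNat := by omega
          rw [if_neg hne]
          simp [hwv]
      constructor
      · rintro ⟨hnd, hmem⟩
        refine ⟨List.nodup_cons.mpr ⟨?_, hnd⟩, ?_⟩
        · intro hvmem
          obtain ⟨⟨hv1, -⟩, hvseen⟩ := hmem v hvmem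
          exact ((hgetset v hv1).mp hvseen).1 rfl
        · intro w hw
          rcases List.mem_cons.mp hw with rfl | hw'
          · exact ⟨⟨h1, h2⟩, hs'⟩
          · obtain ⟨hwr, hwseen⟩ := hmem w hw'
            exact ⟨hwr, ((hgetset w hwr.1).mp hwseen).2⟩
      · rintro ⟨hnd, hmem⟩
        have hnd' := List.nodup_cons.mp hnd
        refine ⟨hnd'.2, ?_⟩
        intro w hw
        obtain ⟨hwr, hwseen⟩ := hmem w (List.mem_cons_of_mem _ hw)
        refine ⟨hwr, (hgetset w hwr.1).mpr ⟨?_, hwseen⟩⟩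
        intro hwv; subst hwv; exact hnd'.1 hw

theorem portB_iff (dice : List Int) : verifySeqBaixa_alt dice = true ↔ SeqProp dice := by
  unfold verifySeqBaixa_alt SeqProp
  rw [altLoop_iff _ _ _ (by simp)]
  constructor
  · rintro ⟨hnd, hmem⟩
    exact ⟨hnd, fun v hv => (hmem v hv).1⟩
  · rintro ⟨hnd, hmem⟩
    refine ⟨hnd, fun v hv => ⟨hmem v hv, ?_⟩⟩
    obtain ⟨h1, h2⟩ := hmem v hv
    simp [List.getD]

-- ===== VERDICT (by name: the statement is the Claim_ definition above) =====
theorem verifySeqBaixa_spec : Claim_equal_verifySeqBaixa := by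
  intro dice _
  unfold Spec_verifySeqBaixa
  rw [Bool.eq_iff_iff, portA_iff, portB_iff]
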